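-- pv_equiv track=rewrite | github.com/cortana-hd/cortana-external | backtester/portfolio/posture.py | _highest_autonomy_mode
-- ===== SOURCE A (Python) =====
-- from typing import Any, Mapping, Sequence
--
-- def _highest_autonomy_mode(strategy_allocations: Sequence[Mapping[str, Any]]) -> str:
--     order = {"advisory": 0, "paper": 1, "supervised_live": 2, "guarded_live": 3}
--     highest = "advisory"
--     for row in strategy_allocations:
--         mode = str(row.get("autonomy_mode") or "advisory")
--         if order.get(mode, -1) > order.get(highest, -1):
--             highest = mode
--     return highest
-- ===== SOURCE B (Python) =====
-- def _highest_autonomy_mode(strategy_allocations):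
--     present = {str(row.get("autonomy_mode") or "advisory") for row in strategy_allocations}
--     for mode in ("guarded_live", "supervised_live", "paper"):
--         if mode in present:
--             return mode
--     return "advisory"
-- ===== Notes on version B (the rewrite author's own statement) =====
-- stated objective: alternative
-- what changed: Replaces the running-max scan keyed by a priority dict with a presence-set built in one pass followed by a fixed descending-priority lookup (unknown modes and empty input still yield 'advisory').
import Mathlib
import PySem

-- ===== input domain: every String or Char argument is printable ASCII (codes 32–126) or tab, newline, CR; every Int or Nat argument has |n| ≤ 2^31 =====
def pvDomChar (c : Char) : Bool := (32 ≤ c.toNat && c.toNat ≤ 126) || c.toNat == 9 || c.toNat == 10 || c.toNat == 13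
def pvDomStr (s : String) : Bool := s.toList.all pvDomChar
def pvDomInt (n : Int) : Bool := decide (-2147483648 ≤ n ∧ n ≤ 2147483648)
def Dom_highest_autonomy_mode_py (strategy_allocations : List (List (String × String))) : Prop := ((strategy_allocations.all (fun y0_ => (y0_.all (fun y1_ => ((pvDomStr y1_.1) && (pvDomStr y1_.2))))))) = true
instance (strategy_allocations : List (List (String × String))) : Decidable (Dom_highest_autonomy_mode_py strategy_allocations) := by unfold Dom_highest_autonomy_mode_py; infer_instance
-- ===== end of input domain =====

-- B replaces A's running-max pass (priority dict + comparison) by a presence set of the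
-- modes followed by a fixed descending-priority lookup; same result on every input.

-- shared helper: the Python expression str(row.get("autonomy_mode") or "advisory")
-- (row.get -> first match in the assoc list; `or` treats None and "" as falsy)
def pvMode (row : List (String × String)) : String :=
  match (PySem.Dict.mk row).get? "autonomy_mode" with
  | none => "advisory"
  | some s => if s = "" then "advisory" else s

-- ===== PORT A =====
def pvOrder : PySem.Dict String Int :=
  PySem.Dict.mk [("advisory", 0), ("paper", 1), ("supervised_live", 2), ("guarded_live", 3)]

def highest_autonomy_mode_py (strategy_allocations : List (List (String × String))) : String :=
  strategy_allocations.foldl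
    (fun highest row =>
      let mode := pvMode row
      if PySem.Dict.getD pvOrder mode (-1) > PySem.Dict.getD pvOrder highest (-1) then mode
      else highest)
    "advisory"

-- ===== PORT B =====
def highest_autonomy_mode_py_alt (strategy_allocations : List (List (String × String))) : String :=
  let present : PySem.Set String :=
    strategy_allocations.foldl (fun s row => PySem.Set.add s (pvMode row)) PySem.Set.empty
  if PySem.Set.contains present "guarded_live" then "guarded_live"
  else if PySem.Set.contains present "supervised_live" then "supervised_live"
  else if PySem.Set.contains present "paper" then "paper"
  else "advisory"

-- ===== PRECONDITION & SPEC =====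
def Spec_highest_autonomy_mode_py (strategy_allocations : List (List (String × String))) (out : String) : Prop := out = highest_autonomy_mode_py_alt strategy_allocations
instance (strategy_allocations : List (List (String × String))) (out : String) : Decidable (Spec_highest_autonomy_mode_py strategy_allocations out) := by unfold Spec_highest_autonomy_mode_py; infer_instance

-- ===== CLAIM (what is proved, stated in full; the proofs are below) =====
def Claim_equal_highest_autonomy_mode_py : Prop := ∀ (strategy_allocations : List (List (String × String))), Dom_highest_autonomy_mode_py strategy_allocations → Spec_highest_autonomy_mode_py strategy_allocations (highest_autonomy_mode_py strategy_allocations)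

-- ===== LEMMAS AND PROOFS =====

-- closed form of A's priority lookup order.get(s, -1)
def pvR4 (s : String) : Int :=
  if s = "guarded_live" then 3
  else if s = "supervised_live" then 2
  else if s = "paper" then 1
  else if s = "advisory" then 0
  else -1

-- inverse of pvR4 on the known modes
def pvInv (r : Int) : String :=
  if r = 3 then "guarded_live"
  else if r = 2 then "supervised_live"
  else if r = 1 then "paper"
  else "advisory"

theorem pv_getD_order (s : String) : PySem.Dict.getD pvOrder s (-1) = pvR4 s := by
  by_cases h3 : s = "guarded_live"
  · subst h3; decide
  by_cases h2 : s = "supervised_live"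
  · subst h2; decide
  by_cases h1 : s = "paper"
  · subst h1; decide
  by_cases h0 : s = "advisory"
  · subst h0; decide
  simp [pvOrder, PySem.Dict.getD, PySem.Dict.get?_mk_cons, pvR4, PySem.Dict.get?,
    beq_iff_eq, Ne.symm h3, Ne.symm h2, Ne.symm h1, Ne.symm h0, h3, h2, h1, h0]

theorem pv_r4_le (s : String) : pvR4 s ≤ 3 := by
  unfold pvR4; split_ifs <;> omega

theorem pv_inv_r4 (s : String) (h : 0 ≤ pvR4 s) : pvInv (pvR4 s) = s := by
  unfold pvR4 at *
  split_ifs at * <;> simp_all [pvInv]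

theorem pv_r4_ne_g (s : String) (h : s ≠ "guarded_live") : pvR4 s ≤ 2 := by
  unfold pvR4; split_ifs <;> first | omega | simp_all

theorem pv_r4_ne_gs (s : String) (hg : s ≠ "guarded_live") (hs : s ≠ "supervised_live") :
    pvR4 s ≤ 1 := by
  unfold pvR4; split_ifs <;> first | omega | simp_all

theorem pv_r4_ne_gsp (s : String) (hg : s ≠ "guarded_live") (hs : s ≠ "supervised_live")
    (hp : s ≠ "paper") : pvR4 s ≤ 0 := by
  unfold pvR4; split_ifs <;> first | omega | simp_all

-- A's fold (after replacing the dict lookup by pvR4) equals pvInv of the running maximum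
theorem pv_foldA (rows : List (List (String × String))) :
    ∀ h : String, 0 ≤ pvR4 h →
    rows.foldl (fun highest row => if pvR4 (pvMode row) > pvR4 highest then pvMode row else highest) h
    = pvInv (rows.foldl (fun a row => max a (pvR4 (pvMode row))) (pvR4 h)) := by
  induction rows with
  | nil => intro h hh; simpa using (pv_inv_r4 h hh).symm
  | cons r rs ih =>
    intro h hh
    simp only [List.foldl_cons]
    by_cases hc : pvR4 (pvMode r) > pvR4 h
    · rw [if_pos hc, show max (pvR4 h) (pvR4 (pvMode r)) = pvR4 (pvMode r) from by omega]
      exact ih (pvMode r) (by omega)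
    · rw [if_neg hc, show max (pvR4 h) (pvR4 (pvMode r)) = pvR4 h from by omega]
      exact ih h hh

theorem pv_portA_eq (rows : List (List (String × String))) :
    highest_autonomy_mode_py rows
    = rows.foldl (fun highest row => if pvR4 (pvMode row) > pvR4 highest then pvMode row else highest) "advisory" := by
  simp only [highest_autonomy_mode_py, pv_getD_order]

theorem pv_M_ge_init (rows : List (List (String × String))) :
    ∀ a : Int, a ≤ rows.foldl (fun a row => max a (pvR4 (pvMode row))) a := by
  induction rows with
  | nil => intro a; simp
  | cons r rs ih =>
    intro a
    simp only [List.foldl_cons]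
    exact le_trans (le_max_left _ _) (ih _)

theorem pv_M_le (rows : List (List (String × String))) (k : Int) :
    ∀ a : Int, (∀ r ∈ rows, pvR4 (pvMode r) ≤ k) → a ≤ k →
    rows.foldl (fun a row => max a (pvR4 (pvMode row))) a ≤ k := by
  induction rows with
  | nil => intro a _ ha; simpa using ha
  | cons r rs ih =>
    intro a hall ha
    simp only [List.foldl_cons]
    exact ih _ (fun x hx => hall x (List.mem_cons_of_mem _ hx))
      (max_le ha (hall r (List.mem_cons_self)))

theorem pv_M_ge_mem (rows : List (List (String × String))) (r : List (String × String))
    (hr : r ∈ rows) : ∀ a : Int, pvR4 (pvMode r) ≤ rows.foldl (fun a row => max a (pvR4 (pvMode row))) a := by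
  induction rows with
  | nil => cases hr
  | cons x xs ih =>
    intro a
    simp only [List.foldl_cons]
    rcases List.mem_cons.mp hr with h | h
    · subst h; exact le_trans (le_max_right _ _) (pv_M_ge_init xs _)
    · exact ih h _

-- membership in B's presence set
theorem pv_present_mem (rows : List (List (String × String))) (y : String) :
    (y ∈ rows.foldl (fun s row => PySem.Set.add s (pvMode row)) PySem.Set.empty)
    ↔ ∃ r ∈ rows, y = pvMode r := by
  rw [PySem.Set.mem_foldl_add]
  simp [PySem.Set.empty]

-- ===== VERDICT (by name: the statement is the Claim_ definition above) =====
theorem highest_autonomy_mode_py_spec : Claim_equal_highest_autonomy_mode_py := by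
  intro rows _
  unfold Spec_highest_autonomy_mode_py highest_autonomy_mode_py_alt
  rw [pv_portA_eq, pv_foldA rows "advisory" (by decide),
    show pvR4 "advisory" = 0 from by decide]
  have hM0 : (0 : Int) ≤ rows.foldl (fun a row => max a (pvR4 (pvMode row))) 0 :=
    pv_M_ge_init rows 0
  by_cases hg : PySem.Set.contains (rows.foldl (fun s row => PySem.Set.add s (pvMode row)) PySem.Set.empty) "guarded_live" = true
  · rw [if_pos hg]
    obtain ⟨r, hr, hre⟩ := (pv_present_mem rows _).mp ((PySem.Set.contains_iff _ _).mp hg)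
    have h3 : (3 : Int) ≤ rows.foldl (fun a row => max a (pvR4 (pvMode row))) 0 := by
      have := pv_M_ge_mem rows r hr 0
      rw [← hre] at this
      simpa [pvR4] using this
    have hle : rows.foldl (fun a row => max a (pvR4 (pvMode row))) 0 ≤ 3 :=
      pv_M_le rows 3 0 (fun r _ => pv_r4_le _) (by omega)
    rw [show rows.foldl (fun a row => max a (pvR4 (pvMode row))) 0 = 3 from by omega]
    decide
  · rw [if_neg hg]
    have hgm : ∀ r ∈ rows, pvMode r ≠ "guarded_live" := by
      intro r hr he
      exact hg ((PySem.Set.contains_iff _ _).mpr ((pv_present_mem rows _).mpr ⟨r, hr, he.symm⟩))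
    have hM2 : rows.foldl (fun a row => max a (pvR4 (pvMode row))) 0 ≤ 2 :=
      pv_M_le rows 2 0 (fun r hr => pv_r4_ne_g _ (hgm r hr)) (by omega)
    by_cases hs : PySem.Set.contains (rows.foldl (fun s row => PySem.Set.add s (pvMode row)) PySem.Set.empty) "supervised_live" = true
    · rw [if_pos hs]
      obtain ⟨r, hr, hre⟩ := (pv_present_mem rows _).mp ((PySem.Set.contains_iff _ _).mp hs)
      have h2 : (2 : Int) ≤ rows.foldl (fun a row => max a (pvR4 (pvMode row))) 0 := by
        have := pv_M_ge_mem rows r hr 0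
        rw [← hre] at this
        simpa [pvR4] using this
      rw [show rows.foldl (fun a row => max a (pvR4 (pvMode row))) 0 = 2 from by omega]
      decide
    · rw [if_neg hs]
      have hsm : ∀ r ∈ rows, pvMode r ≠ "supervised_live" := by
        intro r hr he
        exact hs ((PySem.Set.contains_iff _ _).mpr ((pv_present_mem rows _).mpr ⟨r, hr, he.symm⟩))
      have hM1 : rows.foldl (fun a row => max a (pvR4 (pvMode row))) 0 ≤ 1 :=
        pv_M_le rows 1 0 (fun r hr => pv_r4_ne_gs _ (hgm r hr) (hsm r hr)) (by omega)
      by_cases hp : PySem.Set.contains (rows.foldl (fun s row => PySem.Set.add s (pvMode row)) PySem.Set.empty) "paper" = true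
      · rw [if_pos hp]
        obtain ⟨r, hr, hre⟩ := (pv_present_mem rows _).mp ((PySem.Set.contains_iff _ _).mp hp)
        have h1 : (1 : Int) ≤ rows.foldl (fun a row => max a (pvR4 (pvMode row))) 0 := by
          have := pv_M_ge_mem rows r hr 0
          rw [← hre] at this
          simpa [pvR4] using this
        rw [show rows.foldl (fun a row => max a (pvR4 (pvMode row))) 0 = 1 from by omega]
        decide
      · rw [if_neg hp]
        have hpm : ∀ r ∈ rows, pvMode r ≠ "paper" := by
          intro r hr he
          exact hp ((PySem.Set.contains_iff _ _).mpr ((pv_present_mem rows _).mpr ⟨r, hr, he.symm⟩))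
        have hMz : rows.foldl (fun a row => max a (pvR4 (pvMode row))) 0 ≤ 0 :=
          pv_M_le rows 0 0 (fun r hr => pv_r4_ne_gsp _ (hgm r hr) (hsm r hr) (hpm r hr)) (by omega)
        rw [show rows.foldl (fun a row => max a (pvR4 (pvMode row))) 0 = 0 from by omega]
        decide
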